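-- pv_equiv track=rewrite | github.com/agoponenko/hw_taxdome | evaluate.py | calculate_metrics_for_file
-- ===== SOURCE A (Python) =====
-- from typing import List, Dict, Any
--
-- def calculate_metrics_for_file(predicted: List[Dict], ground_truth: List[Dict]) -> Dict[str, int]:
--     """
--     Compares predicted form data against ground truth for a single file.
--
--     Args:
--         predicted: The list of form dictionaries returned by the parser.
--         ground_truth: The list of form dictionaries from the ground-truth JSON.
--
--     Returns:
--         A dictionary containing the counts of true positives, false positives,
--         and false negatives for this file.
--     """
--     # To compare lists of dictionaries, we convert them into a hashable format (sets of tuples).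
--     # This allows for efficient set-based comparisons. We sort the items in each
--     # dictionary to ensure a canonical representation.
--     predicted_set = {tuple(sorted(p.items())) for p in predicted}
--     truth_set = {tuple(sorted(t.items())) for t in ground_truth}
--
--     true_positives = len(predicted_set.intersection(truth_set))
--     false_positives = len(predicted_set.difference(truth_set))
--     false_negatives = len(truth_set.difference(predicted_set))
--
--     return {
--         "tp": true_positives,
--         "fp": false_positives,
--         "fn": false_negatives
--     }
-- ===== SOURCE B (Python) =====
-- def calculate_metrics_for_file(predicted, ground_truth):
--     # Sort-merge strategy: canonicalize each form, sort + dedup each side,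
--     # then a two-pointer merge counts tp / fp / fn in one linear walk.
--     def norm(forms):
--         canon = sorted(sorted(d.items()) for d in forms)
--         out = []
--         for c in canon:
--             if not out or out[-1] != c:
--                 out.append(c)
--         return out
--
--     ps = norm(predicted)
--     ts = norm(ground_truth)
--     tp = fp = fn = 0
--     i = j = 0
--     while i < len(ps) and j < len(ts):
--         if ps[i] == ts[j]:
--             tp += 1
--             i += 1
--             j += 1
--         elif ps[i] < ts[j]:
--             fp += 1
--             i += 1
--         else:
--             fn += 1
--             j += 1
--     fp += len(ps) - i
--     fn += len(ts) - j
--     return {"tp": tp, "fp": fp, "fn": fn}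
-- ===== Notes on version B (the rewrite author's own statement) =====
-- stated objective: alternative
-- what changed: Replaces hash-set intersection/difference with canonicalize + sort + adjacent-dedup and a two-pointer linear merge that counts tp/fp/fn in one walk.
import Mathlib
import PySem

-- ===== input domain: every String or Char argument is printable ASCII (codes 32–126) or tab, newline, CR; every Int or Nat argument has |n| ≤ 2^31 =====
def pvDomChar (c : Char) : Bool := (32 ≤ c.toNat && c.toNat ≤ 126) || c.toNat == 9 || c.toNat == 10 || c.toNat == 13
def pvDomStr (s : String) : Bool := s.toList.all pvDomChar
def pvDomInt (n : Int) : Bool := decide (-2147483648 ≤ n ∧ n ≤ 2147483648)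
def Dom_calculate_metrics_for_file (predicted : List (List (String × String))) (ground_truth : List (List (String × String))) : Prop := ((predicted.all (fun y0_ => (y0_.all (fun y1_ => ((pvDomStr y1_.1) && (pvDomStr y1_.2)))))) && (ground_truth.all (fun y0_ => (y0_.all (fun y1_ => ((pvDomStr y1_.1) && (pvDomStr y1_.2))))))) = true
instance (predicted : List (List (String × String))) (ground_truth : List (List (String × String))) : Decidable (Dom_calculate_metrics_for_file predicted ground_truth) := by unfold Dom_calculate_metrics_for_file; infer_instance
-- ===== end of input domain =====

-- ===== PORT A =====
-- B changes the algorithm only: hash-set intersection/difference (A) vs sort + adjacent-dedup + two-pointer merge (B); same exact result.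
-- shared canonicalization used by BOTH Pythons: the form dict built from the pairs, then sorted(d.items())
-- (sorted over (key, value) string tuples = sorted2 with the two projections; exact: Lean's String '<' is Python's on ASCII)
def pvDictOf (d : List (String × String)) : PySem.Dict String String :=
  d.foldl (fun acc kv => acc.insert kv.1 kv.2) PySem.Dict.empty

def pvCanon (d : List (String × String)) : List (String × String) :=
  PySem.List.sorted2 (pvDictOf d).items Prod.fst Prod.snd

def calculate_metrics_for_file (predicted : List (List (String × String))) (ground_truth : List (List (String × String))) : List (String × Int) :=
  let predicted_set : PySem.Set (List (String × String)) := PySem.Set.ofList (predicted.map pvCanon)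
  let truth_set : PySem.Set (List (String × String)) := PySem.Set.ofList (ground_truth.map pvCanon)
  let true_positives : Int := (PySem.Set.inter predicted_set truth_set).length
  let false_positives : Int := (PySem.Set.diff predicted_set truth_set).length
  let false_negatives : Int := (PySem.Set.diff truth_set predicted_set).length
  [("tp", true_positives), ("fp", false_positives), ("fn", false_negatives)]

-- ===== PORT B =====
-- hand port of Python's '<' on (String × String) tuples (lexicographic; exact for ASCII strings)
def pvPairLt (a b : String × String) : Bool :=
  decide (a.1 < b.1) || (a.1 == b.1 && decide (a.2 < b.2))

-- hand port of Python's '<' on lists of such tuples (lexicographic; exact)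
def pvFormLt : List (String × String) → List (String × String) → Bool
  | _, [] => false
  | [], _ :: _ => true
  | a :: as_, b :: bs => if a == b then pvFormLt as_ bs else pvPairLt a b

-- sorted(canon) (builtin stable sort, ported as PySem's insertion sort with the hand comparison)
-- then the adjacent-dedup loop of Source B
def pvNorm (forms : List (List (String × String))) : List (List (String × String)) :=
  let canon := (forms.map pvCanon).foldl (fun acc x => PySem.List.insertBy pvFormLt x acc) []
  canon.foldl (fun out c =>
    match out.getLast? with
    | none => out ++ [c]
    | some l => if l == c then out else out ++ [c]) []

-- the two-pointer while loop of Source B (tail counting folded into the base cases)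
def pvMerge : List (List (String × String)) → List (List (String × String)) → Int × Int × Int
  | [], ts => (0, 0, (ts.length : Int))
  | p :: ps, [] => (0, ((p :: ps).length : Int), 0)
  | p :: ps, t :: ts =>
    if p == t then
      let r := pvMerge ps ts
      (r.1 + 1, r.2.1, r.2.2)
    else if pvFormLt p t then
      let r := pvMerge ps (t :: ts)
      (r.1, r.2.1 + 1, r.2.2)
    else
      let r := pvMerge (p :: ps) ts
      (r.1, r.2.1, r.2.2 + 1)
  termination_by ps ts => ps.length + ts.length

def calculate_metrics_for_file_alt (predicted : List (List (String × String))) (ground_truth : List (List (String × String))) : List (String × Int) :=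
  let ps := pvNorm predicted
  let ts := pvNorm ground_truth
  let r := pvMerge ps ts
  [("tp", r.1), ("fp", r.2.1), ("fn", r.2.2)]


-- ===== PRECONDITION & SPEC =====
def Spec_calculate_metrics_for_file (predicted : List (List (String × String))) (ground_truth : List (List (String × String))) (out : List (String × Int)) : Prop := out = calculate_metrics_for_file_alt predicted ground_truth
instance (predicted : List (List (String × String))) (ground_truth : List (List (String × String))) (out : List (String × Int)) : Decidable (Spec_calculate_metrics_for_file predicted ground_truth out) := by unfold Spec_calculate_metrics_for_file; infer_instance

-- ===== CLAIM (what is proved, stated in full; the proofs are below) =====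
def Claim_equal_calculate_metrics_for_file : Prop := ∀ (predicted : List (List (String × String))) (ground_truth : List (List (String × String))), Dom_calculate_metrics_for_file predicted ground_truth → Spec_calculate_metrics_for_file predicted ground_truth (calculate_metrics_for_file predicted ground_truth)


-- ===== LEMMAS AND PROOFS =====

-- generic helpers about getLast?
theorem pvGetLast?_mem {α : Type} {l : List α} {a : α} (h : l.getLast? = some a) : a ∈ l := by
  induction l with
  | nil => simp at h
  | cons x xs ih =>
    cases xs with
    | nil => simp_all
    | cons y ys =>
      rw [List.getLast?_cons_cons] at h
      exact List.mem_cons_of_mem _ (ih h)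

theorem pvLast_top {α : Type} {r : α → α → Prop} {l : List α} {lst : α}
    (h : l.getLast? = some lst) (hp : l.Pairwise r) {a : α} (ha : a ∈ l) : a = lst ∨ r a lst := by
  induction l with
  | nil => simp at h
  | cons x xs ih =>
    cases xs with
    | nil =>
      simp at h ha
      subst h; subst ha; exact Or.inl rfl
    | cons y ys =>
      rw [List.getLast?_cons_cons] at h
      rcases List.mem_cons.1 ha with rfl | ha'
      · exact Or.inr ((List.pairwise_cons.1 hp).1 lst (pvGetLast?_mem h))
      · exact ih h (List.pairwise_cons.1 hp).2 ha'

theorem pvPairLt_asymm {a b : String × String} (h : pvPairLt a b = true) : pvPairLt b a = false := by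
  simp only [pvPairLt, Bool.or_eq_true, Bool.and_eq_true, decide_eq_true_eq, beq_iff_eq] at h
  simp only [pvPairLt, Bool.or_eq_false_iff, Bool.and_eq_false_iff, decide_eq_false_iff_not, beq_eq_false_iff_ne]
  rcases h with h | ⟨h1, h2⟩
  · exact ⟨lt_asymm h, Or.inl (ne_of_gt h)⟩
  · exact ⟨by rw [h1]; exact lt_irrefl _, Or.inr (lt_asymm h2)⟩

theorem pvPairLt_trans {a b c : String × String} (h1 : pvPairLt a b = true) (h2 : pvPairLt b c = true) :
    pvPairLt a c = true := by
  simp only [pvPairLt, Bool.or_eq_true, Bool.and_eq_true, decide_eq_true_eq, beq_iff_eq] at h1 h2 ⊢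
  rcases h1 with h1 | ⟨e1, l1⟩ <;> rcases h2 with h2 | ⟨e2, l2⟩
  · exact Or.inl (lt_trans h1 h2)
  · exact Or.inl (e2 ▸ h1)
  · exact Or.inl (e1 ▸ h2)
  · exact Or.inr ⟨e1.trans e2, lt_trans l1 l2⟩

theorem pvPairLt_connex {a b : String × String} (hne : a ≠ b) (h : pvPairLt a b = false) :
    pvPairLt b a = true := by
  simp only [pvPairLt, Bool.or_eq_false_iff, Bool.and_eq_false_iff, decide_eq_false_iff_not, beq_eq_false_iff_ne] at h
  simp only [pvPairLt, Bool.or_eq_true, Bool.and_eq_true, decide_eq_true_eq, beq_iff_eq]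
  obtain ⟨h1, h2⟩ := h
  rcases lt_trichotomy a.1 b.1 with hlt | heq | hgt
  · exact absurd hlt h1
  · rcases h2 with h2 | h2
    · exact absurd heq h2
    · rcases lt_trichotomy a.2 b.2 with hlt2 | heq2 | hgt2
      · exact absurd hlt2 h2
      · exact absurd (Prod.ext heq heq2) hne
      · exact Or.inr ⟨heq.symm, hgt2⟩
  · exact Or.inl hgt

theorem pvFormLt_irrefl (x : List (String × String)) : pvFormLt x x = false := by
  induction x with
  | nil => rfl
  | cons a as ih => simp [pvFormLt, ih]

theorem pvFormLt_asymm : ∀ {x y : List (String × String)}, pvFormLt x y = true → pvFormLt y x = false := by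
  intro x
  induction x with
  | nil =>
    intro y h
    cases y with
    | nil => simp [pvFormLt] at h
    | cons b bs => simp [pvFormLt]
  | cons a as ih =>
    intro y h
    cases y with
    | nil => simp [pvFormLt] at h
    | cons b bs =>
      by_cases hab : a = b
      · subst hab
        simp only [pvFormLt, BEq.rfl, if_true] at h ⊢
        exact ih h
      · have h1 : (a == b) = false := beq_eq_false_iff_ne.mpr hab
        have h2 : (b == a) = false := beq_eq_false_iff_ne.mpr (Ne.symm hab)
        simp only [pvFormLt, h1, h2, Bool.false_eq_true, if_false] at h ⊢
        exact pvPairLt_asymm h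

theorem pvFormLt_trans : ∀ {x y z : List (String × String)}, pvFormLt x y = true → pvFormLt y z = true →
    pvFormLt x z = true := by
  intro x
  induction x with
  | nil =>
    intro y z h1 h2
    cases y with
    | nil => simp [pvFormLt] at h1
    | cons b bs =>
      cases z with
      | nil => simp [pvFormLt] at h2
      | cons c cs => simp [pvFormLt]
  | cons a as ih =>
    intro y z h1 h2
    cases y with
    | nil => simp [pvFormLt] at h1
    | cons b bs =>
      cases z with
      | nil => simp [pvFormLt] at h2
      | cons c cs =>
        by_cases hab : a = b <;> by_cases hbc : b = c
        · subst hab; subst hbc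
          simp only [pvFormLt, BEq.rfl, if_true] at h1 h2 ⊢
          exact ih h1 h2
        · subst hab
          have e2 : (a == c) = false := beq_eq_false_iff_ne.mpr hbc
          simp only [pvFormLt, e2, Bool.false_eq_true, if_false] at h2 ⊢
          exact h2
        · subst hbc
          have e1 : (a == b) = false := beq_eq_false_iff_ne.mpr hab
          simp only [pvFormLt, e1, Bool.false_eq_true, if_false] at h1 ⊢
          exact h1
        · have e1 : (a == b) = false := beq_eq_false_iff_ne.mpr hab
          have e2 : (b == c) = false := beq_eq_false_iff_ne.mpr hbc
          simp only [pvFormLt, e1, e2, Bool.false_eq_true, if_false] at h1 h2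
          by_cases hac : a = c
          · subst hac
            have := pvPairLt_asymm h1
            rw [h2] at this
            simp at this
          · have e3 : (a == c) = false := beq_eq_false_iff_ne.mpr hac
            simp only [pvFormLt, e3, Bool.false_eq_true, if_false]
            exact pvPairLt_trans h1 h2

theorem pvFormLt_connex : ∀ {x y : List (String × String)}, x ≠ y → pvFormLt x y = false →
    pvFormLt y x = true := by
  intro x
  induction x with
  | nil =>
    intro y hne h
    cases y with
    | nil => exact absurd rfl hne
    | cons b bs => simp [pvFormLt] at h
  | cons a as ih =>
    intro y hne h
    cases y with
    | nil => rfl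
    | cons b bs =>
      by_cases hab : a = b
      · subst hab
        have hne' : as ≠ bs := fun e => hne (by rw [e])
        simp only [pvFormLt, BEq.rfl, if_true] at h ⊢
        exact ih hne' h
      · have e1 : (a == b) = false := beq_eq_false_iff_ne.mpr hab
        have e2 : (b == a) = false := beq_eq_false_iff_ne.mpr (Ne.symm hab)
        simp only [pvFormLt, e1, e2, Bool.false_eq_true, if_false] at h ⊢
        exact pvPairLt_connex hab h

-- lt a b and ¬ lt c b imply lt a c
theorem pvFormLt_trans_le {a b c : List (String × String)} (h1 : pvFormLt a b = true)
    (h2 : pvFormLt c b = false) : pvFormLt a c = true := by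
  by_cases hcb : c = b
  · subst hcb; exact h1
  · exact pvFormLt_trans h1 (pvFormLt_connex hcb h2)

theorem pvInsertBy_pairwise {x : List (String × String)} {ys : List (List (String × String))}
    (h : ys.Pairwise (fun a b => pvFormLt b a = false)) :
    (PySem.List.insertBy pvFormLt x ys).Pairwise (fun a b => pvFormLt b a = false) := by
  induction ys with
  | nil => simp [PySem.List.insertBy]
  | cons y ys ih =>
    obtain ⟨hy, hys⟩ := List.pairwise_cons.1 h
    simp only [PySem.List.insertBy]
    by_cases hxy : pvFormLt x y = true
    · simp only [hxy, if_true]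
      refine List.pairwise_cons.2 ⟨?_, h⟩
      intro z hz
      rcases List.mem_cons.1 hz with rfl | hz'
      · exact pvFormLt_asymm hxy
      · exact pvFormLt_asymm (pvFormLt_trans_le hxy (hy z hz'))
    · simp only [hxy]

      refine List.pairwise_cons.2 ⟨?_, ih hys⟩
      intro z hz
      rcases (PySem.List.mem_insertBy _ _ _ _).1 hz with rfl | hz'
      · exact Bool.not_eq_true _ |>.mp hxy
      · exact hy z hz'

theorem pvSort_pairwise_aux (xs : List (List (String × String))) (acc : List (List (String × String)))
    (hacc : acc.Pairwise (fun a b => pvFormLt b a = false)) :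
    (xs.foldl (fun acc x => PySem.List.insertBy pvFormLt x acc) acc).Pairwise (fun a b => pvFormLt b a = false) := by
  induction xs generalizing acc with
  | nil => exact hacc
  | cons x xs ih => exact ih _ (pvInsertBy_pairwise hacc)

theorem pvSort_pairwise (xs : List (List (String × String))) :
    (xs.foldl (fun acc x => PySem.List.insertBy pvFormLt x acc) []).Pairwise (fun a b => pvFormLt b a = false) :=
  pvSort_pairwise_aux xs [] List.Pairwise.nil

theorem pvSort_mem_aux (xs : List (List (String × String))) (acc : List (List (String × String)))
    (y : List (String × String)) :
    y ∈ xs.foldl (fun acc x => PySem.List.insertBy pvFormLt x acc) acc ↔ y ∈ acc ∨ y ∈ xs := by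
  induction xs generalizing acc with
  | nil => simp
  | cons x xs ih =>
    simp only [List.foldl_cons, ih, PySem.List.mem_insertBy, List.mem_cons]
    tauto

theorem pvSort_mem (xs : List (List (String × String))) (y : List (String × String)) :
    y ∈ xs.foldl (fun acc x => PySem.List.insertBy pvFormLt x acc) [] ↔ y ∈ xs := by
  rw [pvSort_mem_aux]; simp

theorem pvDedup_mem (l acc : List (List (String × String))) (y : List (String × String)) :
    y ∈ l.foldl (fun out c =>
      match out.getLast? with
      | none => out ++ [c]
      | some lst => if lst == c then out else out ++ [c]) acc ↔ y ∈ acc ∨ y ∈ l := by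
  induction l generalizing acc with
  | nil => simp
  | cons c l' ih =>
    rw [List.foldl_cons, ih]
    have : y ∈ (match acc.getLast? with
      | none => acc ++ [c]
      | some lst => if lst == c then acc else acc ++ [c]) ↔ y ∈ acc ∨ y = c := by
      rcases hlast : acc.getLast? with _ | lst
      · simp
      · by_cases hc : lst = c
        · simp only [hc, BEq.rfl, if_true]
          constructor
          · exact Or.inl
          · rintro (h | rfl)
            · exact h
            · exact hc ▸ pvGetLast?_mem hlast
        · have : (lst == c) = false := beq_eq_false_iff_ne.mpr hc
          simp [this]
    rw [this, List.mem_cons]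
    tauto

theorem pvDedup_pairwise (l acc : List (List (String × String)))
    (hl : l.Pairwise (fun a b => pvFormLt b a = false))
    (hacc : acc.Pairwise (fun a b => pvFormLt a b = true))
    (hcross : ∀ a ∈ acc, ∀ c ∈ l, pvFormLt c a = false) :
    (l.foldl (fun out c =>
      match out.getLast? with
      | none => out ++ [c]
      | some lst => if lst == c then out else out ++ [c]) acc).Pairwise (fun a b => pvFormLt a b = true) := by
  induction l generalizing acc with
  | nil => exact hacc
  | cons c l' ih =>
    obtain ⟨hc, hl'⟩ := List.pairwise_cons.1 hl
    rw [List.foldl_cons]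
    rcases hlast : acc.getLast? with _ | lst
    · -- acc is empty
      have hacc0 : acc = [] := List.getLast?_eq_none_iff.1 hlast
      subst hacc0
      have h1 : ([c] : List (List (String × String))).Pairwise (fun a b => pvFormLt a b = true) := by
        simp
      refine ih [c] hl' h1 ?_
      intro a ha d hd
      rcases List.mem_singleton.1 ha with rfl
      exact hc d hd
    · by_cases heq : lst = c
      · have e : (lst == c) = true := beq_iff_eq.mpr heq
        simp only [e, if_true]
        refine ih acc hl' hacc ?_
        intro a ha d hd
        exact hcross a ha d (List.mem_cons_of_mem _ hd)
      · have e : (lst == c) = false := beq_eq_false_iff_ne.mpr heq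
        simp only [e, Bool.false_eq_true, if_false]
        refine ih (acc ++ [c]) hl' ?_ ?_
        · rw [List.pairwise_append]
          refine ⟨hacc, by simp, ?_⟩
          intro a ha b hb
          rcases List.mem_singleton.1 hb with rfl
          have hle : pvFormLt b a = false := hcross a ha b (List.mem_cons_self ..)
          have hne : a ≠ b := by
            rintro rfl
            rcases pvLast_top hlast hacc ha with rfl | hlt
            · exact heq rfl
            · have := hcross lst (pvGetLast?_mem hlast) a (List.mem_cons_self ..)
              rw [hlt] at this
              simp at this
          exact pvFormLt_connex (fun h => hne h.symm) hle
        · intro a ha d hd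
          rcases List.mem_append.1 ha with ha' | ha'
          · exact hcross a ha' d (List.mem_cons_of_mem _ hd)
          · rcases List.mem_singleton.1 ha' with rfl
            exact hc d hd

theorem pvNorm_pairwise (forms : List (List (String × String))) :
    (pvNorm forms).Pairwise (fun a b => pvFormLt a b = true) := by
  unfold pvNorm
  exact pvDedup_pairwise _ [] (pvSort_pairwise _) List.Pairwise.nil (by simp)

theorem pvNorm_mem (forms : List (List (String × String))) (y : List (String × String)) :
    y ∈ pvNorm forms ↔ y ∈ forms.map pvCanon := by
  unfold pvNorm
  rw [pvDedup_mem, pvSort_mem]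
  simp

theorem pvNorm_nodup (forms : List (List (String × String))) : (pvNorm forms).Nodup :=
  (pvNorm_pairwise forms).imp (fun {a b} hlt => by
    rintro rfl
    rw [pvFormLt_irrefl] at hlt
    simp at hlt)

theorem pvMerge_eq_of_eq {p t : List (String × String)} {ps ts : List (List (String × String))}
    (h : (p == t) = true) :
    pvMerge (p :: ps) (t :: ts) = ((pvMerge ps ts).1 + 1, (pvMerge ps ts).2.1, (pvMerge ps ts).2.2) := by
  simp [pvMerge, h]

theorem pvMerge_eq_of_lt {p t : List (String × String)} {ps ts : List (List (String × String))}
    (h : (p == t) = false) (hlt : pvFormLt p t = true) :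
    pvMerge (p :: ps) (t :: ts) = ((pvMerge ps (t :: ts)).1, (pvMerge ps (t :: ts)).2.1 + 1, (pvMerge ps (t :: ts)).2.2) := by
  simp [pvMerge, h, hlt]

theorem pvMerge_eq_of_gt {p t : List (String × String)} {ps ts : List (List (String × String))}
    (h : (p == t) = false) (hlt : pvFormLt p t = false) :
    pvMerge (p :: ps) (t :: ts) = ((pvMerge (p :: ps) ts).1, (pvMerge (p :: ps) ts).2.1, (pvMerge (p :: ps) ts).2.2 + 1) := by
  simp [pvMerge, h, hlt]

theorem pvMerge_spec : ∀ (ps ts : List (List (String × String))),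
    ps.Pairwise (fun a b => pvFormLt a b = true) → ts.Pairwise (fun a b => pvFormLt a b = true) →
    pvMerge ps ts = ((ps.countP (fun x => ts.contains x) : Int),
                    (ps.countP (fun x => !(ts.contains x)) : Int),
                    (ts.countP (fun x => !(ps.contains x)) : Int)) := by
  intro ps ts hp ht
  induction ps, ts using pvMerge.induct with
  | case1 ts =>
    simp [pvMerge]
  | case2 p ps =>
    simp [pvMerge]
  | case3 p ps t ts heq ih =>
    have hpt : p = t := beq_iff_eq.1 heq
    subst hpt
    obtain ⟨hph, hpt'⟩ := List.pairwise_cons.1 hp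
    obtain ⟨hth, htt'⟩ := List.pairwise_cons.1 ht
    have key := ih hpt' htt'
    have hnep : ∀ x ∈ ps, x ≠ p := by
      intro x hx
      rintro rfl
      have := hph x hx
      rw [pvFormLt_irrefl] at this
      simp at this
    have hnet : ∀ y ∈ ts, y ≠ p := by
      intro y hy
      rintro rfl
      have := hth y hy
      rw [pvFormLt_irrefl] at this
      simp at this
    have g1 : ps.countP (fun x => (p :: ts).contains x) = ps.countP (fun x => ts.contains x) :=
      List.countP_congr (fun x hx => by simp [hnep x hx])
    have g2 : ps.countP (fun x => !((p :: ts).contains x)) = ps.countP (fun x => !(ts.contains x)) :=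
      List.countP_congr (fun x hx => by simp [hnep x hx])
    have g3 : ts.countP (fun y => !((p :: ps).contains y)) = ts.countP (fun y => !(ps.contains y)) :=
      List.countP_congr (fun y hy => by simp [hnet y hy])
    have c1 : (p :: ps).countP (fun x => (p :: ts).contains x) = ps.countP (fun x => ts.contains x) + 1 := by
      rw [List.countP_cons, g1]
      simp
    have c2 : (p :: ps).countP (fun x => !((p :: ts).contains x)) = ps.countP (fun x => !(ts.contains x)) := by
      rw [List.countP_cons, g2]
      simp
    have c3 : (p :: ts).countP (fun x => !((p :: ps).contains x)) = ts.countP (fun x => !(ps.contains x)) := by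
      rw [List.countP_cons, g3]
      simp
    rw [pvMerge_eq_of_eq heq, key]
    rw [c1, c2, c3]
    simp
  | case4 p ps t ts hne hlt ih =>
    have hne' : (p == t) = false := by simpa using hne
    have hlt' : pvFormLt p t = true := by simpa using hlt
    have hpt : p ≠ t := beq_eq_false_iff_ne.1 hne'
    obtain ⟨hph, hpt'⟩ := List.pairwise_cons.1 hp
    obtain ⟨hth, htt'⟩ := List.pairwise_cons.1 ht
    have key := ih hpt' ht
    have hpnotin : p ∉ t :: ts := by
      intro hmem
      rcases List.mem_cons.1 hmem with rfl | hmem'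
      · exact hpt rfl
      · have := pvFormLt_asymm (hth p hmem')
        rw [hlt'] at this
        simp at this
    have hpts : p ∉ ts := fun h => hpnotin (List.mem_cons_of_mem _ h)
    have c1 : (p :: ps).countP (fun x => (t :: ts).contains x) = ps.countP (fun x => (t :: ts).contains x) := by
      rw [List.countP_cons]
      simp [hpt, hpts]
    have c2 : (p :: ps).countP (fun x => !((t :: ts).contains x)) = ps.countP (fun x => !((t :: ts).contains x)) + 1 := by
      rw [List.countP_cons]
      simp [hpt, hpts]
    have c3 : (t :: ts).countP (fun x => !((p :: ps).contains x)) = (t :: ts).countP (fun x => !(ps.contains x)) := by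
      refine List.countP_congr (fun y hy => ?_)
      have hyp : y ≠ p := by
        rintro rfl
        exact hpnotin hy
      simp [hyp]
    rw [pvMerge_eq_of_lt hne' hlt', key]
    rw [c1, c2, c3]
    simp
  | case5 p ps t ts hne hnlt ih =>
    have hne' : (p == t) = false := by simpa using hne
    have hnlt' : pvFormLt p t = false := by simpa using hnlt
    have hpt : p ≠ t := beq_eq_false_iff_ne.1 hne'
    have hlt : pvFormLt t p = true := pvFormLt_connex hpt hnlt'
    obtain ⟨hph, hpt'⟩ := List.pairwise_cons.1 hp
    obtain ⟨hth, htt'⟩ := List.pairwise_cons.1 ht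
    have key := ih hp htt'
    have htnotin : t ∉ p :: ps := by
      intro hmem
      rcases List.mem_cons.1 hmem with rfl | hmem'
      · exact hpt rfl
      · have := pvFormLt_asymm (hph t hmem')
        rw [hlt] at this
        simp at this
    have htps : t ∉ ps := fun h => htnotin (List.mem_cons_of_mem _ h)
    have c1 : (p :: ps).countP (fun x => (t :: ts).contains x) = (p :: ps).countP (fun x => ts.contains x) := by
      refine List.countP_congr (fun x hx => ?_)
      have hxt : x ≠ t := by
        rintro rfl
        exact htnotin hx
      simp [hxt]
    have c2 : (p :: ps).countP (fun x => !((t :: ts).contains x)) = (p :: ps).countP (fun x => !(ts.contains x)) := by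
      refine List.countP_congr (fun x hx => ?_)
      have hxt : x ≠ t := by
        rintro rfl
        exact htnotin hx
      simp [hxt]
    have c3 : (t :: ts).countP (fun x => !((p :: ps).contains x)) = ts.countP (fun x => !((p :: ps).contains x)) + 1 := by
      rw [List.countP_cons]
      simp [Ne.symm hpt, htps]
    rw [pvMerge_eq_of_gt hne' hnlt', key]
    rw [c1, c2, c3]
    simp

theorem pvSetCount_eq {LP : List (List (String × String))} {forms : List (List (String × String))}
    (hmem : ∀ y, y ∈ PySem.Set.ofList LP ↔ y ∈ pvNorm forms) (p q : List (String × String) → Bool)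
    (hpq : ∀ x ∈ pvNorm forms, p x = q x) :
    (PySem.Set.ofList LP).countP p = (pvNorm forms).countP q := by
  have hperm : (PySem.Set.ofList LP).Perm (pvNorm forms) :=
    (List.perm_ext_iff_of_nodup (PySem.Set.nodup_ofList _) (pvNorm_nodup _)).2 hmem
  rw [hperm.countP_eq]
  apply List.countP_congr
  intro x hx
  rw [hpq x hx]

-- ===== VERDICT (by name: the statement is the Claim_ definition above) =====
theorem calculate_metrics_for_file_spec : Claim_equal_calculate_metrics_for_file := by
  intro predicted ground_truth _
  unfold Spec_calculate_metrics_for_file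
  unfold calculate_metrics_for_file calculate_metrics_for_file_alt
  simp only
  rw [pvMerge_spec _ _ (pvNorm_pairwise _) (pvNorm_pairwise _)]
  have hmemP : ∀ y, y ∈ PySem.Set.ofList (predicted.map pvCanon) ↔ y ∈ pvNorm predicted := by
    intro y; rw [PySem.Set.mem_ofList, pvNorm_mem]
  have hmemT : ∀ y, y ∈ PySem.Set.ofList (ground_truth.map pvCanon) ↔ y ∈ pvNorm ground_truth := by
    intro y; rw [PySem.Set.mem_ofList, pvNorm_mem]
  have hcontT : ∀ x, (PySem.Set.ofList (ground_truth.map pvCanon)).contains x = (pvNorm ground_truth).contains x := by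
    intro x
    simp only [PySem.Set.contains]
    rw [Bool.eq_iff_iff, List.contains_iff_mem, List.contains_iff_mem]
    exact hmemT x
  have hcontP : ∀ x, (PySem.Set.ofList (predicted.map pvCanon)).contains x = (pvNorm predicted).contains x := by
    intro x
    simp only [PySem.Set.contains]
    rw [Bool.eq_iff_iff, List.contains_iff_mem, List.contains_iff_mem]
    exact hmemP x
  have e1 : (PySem.Set.inter (PySem.Set.ofList (predicted.map pvCanon)) (PySem.Set.ofList (ground_truth.map pvCanon))).length
      = (pvNorm predicted).countP (fun x => (pvNorm ground_truth).contains x) := by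
    rw [PySem.Set.inter, ← List.countP_eq_length_filter]
    exact pvSetCount_eq hmemP _ _ (fun x _ => hcontT x)
  have e2 : (PySem.Set.diff (PySem.Set.ofList (predicted.map pvCanon)) (PySem.Set.ofList (ground_truth.map pvCanon))).length
      = (pvNorm predicted).countP (fun x => !((pvNorm ground_truth).contains x)) := by
    rw [PySem.Set.diff, ← List.countP_eq_length_filter]
    refine pvSetCount_eq hmemP _ _ (fun x _ => ?_)
    rw [hcontT x]
  have e3 : (PySem.Set.diff (PySem.Set.ofList (ground_truth.map pvCanon)) (PySem.Set.ofList (predicted.map pvCanon))).length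
      = (pvNorm ground_truth).countP (fun x => !((pvNorm predicted).contains x)) := by
    rw [PySem.Set.diff, ← List.countP_eq_length_filter]
    refine pvSetCount_eq hmemT _ _ (fun x _ => ?_)
    rw [hcontP x]
  rw [e1, e2, e3]
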